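-- pv_equiv track=rewrite | github.com/dag7dev/architecture-helper | hit-miss-cache-calc.py | hit_or_miss
-- ===== SOURCE A (Python) =====
-- def hit_or_miss(cache, set_number, block_number, last_element_pointers):
--     """
--     # DETERMINE WHETHER HIT OR MISS
--     # =============================
--     # when miss? -> when i try to access to data and block is not stored anywhere in that set (row)
--     # when hit? -> when i try to access to data and block is stored in the set (row)
--
--     # last_element_pointers -> array who contains pointer to the last element
--     """
--     for cell in range(len(cache[set_number])):
--         data = cache[set_number][cell]
--         row = cache[set_number]  # row
--
--         if block_number not in row and data is None:
--             row[cell] = block_number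
--             last_element_pointers[set_number] = row.index(block_number)
--             return "M"
--
--         elif block_number not in row and None not in row:
--             # it sucks but it works just for two-sided
--             if last_element_pointers[set_number] == 1:
--                 last_element_pointers[set_number] -= 1
--             else:
--                 last_element_pointers[set_number] += 1
--
--             row[last_element_pointers[set_number]] = block_number
--
--             return "M"
--
--         elif block_number in row:
--             return "H"
-- ===== SOURCE B (Python) =====
-- def hit_or_miss(cache, set_number, block_number, last_element_pointers):
--     row = cache[set_number]
--     if block_number in row:
--         return "H"
--     if None in row:
--         idx = row.index(None)
--         row[idx] = block_number
--         last_element_pointers[set_number] = idx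
--         return "M"
--     ptr = last_element_pointers[set_number]
--     ptr = ptr - 1 if ptr == 1 else ptr + 1
--     last_element_pointers[set_number] = ptr
--     row[ptr] = block_number
--     return "M"
-- ===== Notes on version B (the rewrite author's own statement) =====
-- stated objective: simpler
-- what changed: Replaces A's per-cell loop (which re-tests membership of block_number and None in the row on every iteration) with one flat decision: one hit test, one None search via row.index, and the eviction arithmetic, with no loop at all.
-- outside the precondition, e.g. on hit_or_miss([[]], 0, 5, [0]): A returns None, B raises IndexError
import Mathlib
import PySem

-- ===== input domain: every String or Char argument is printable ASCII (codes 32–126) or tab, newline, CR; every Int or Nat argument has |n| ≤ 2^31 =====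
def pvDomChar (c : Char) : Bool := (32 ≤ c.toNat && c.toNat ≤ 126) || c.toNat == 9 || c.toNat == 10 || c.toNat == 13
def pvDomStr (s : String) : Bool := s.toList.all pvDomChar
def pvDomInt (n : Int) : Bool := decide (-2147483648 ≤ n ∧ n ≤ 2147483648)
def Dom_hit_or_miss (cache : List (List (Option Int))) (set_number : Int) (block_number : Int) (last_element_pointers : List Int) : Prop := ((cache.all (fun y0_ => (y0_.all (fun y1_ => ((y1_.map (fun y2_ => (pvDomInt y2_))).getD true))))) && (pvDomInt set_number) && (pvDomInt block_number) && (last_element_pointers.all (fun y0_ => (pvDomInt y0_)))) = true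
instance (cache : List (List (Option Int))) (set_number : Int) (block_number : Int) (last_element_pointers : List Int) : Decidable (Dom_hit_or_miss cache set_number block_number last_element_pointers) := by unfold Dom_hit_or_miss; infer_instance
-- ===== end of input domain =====

-- B replaces A's per-cell loop by one flat decision (hit test, first-None search, eviction
-- arithmetic); objective: simpler. Both A and B mutate `cache[set_number]` and
-- `last_element_pointers` identically; the equivalence proved here is about the RETURN value only.

-- ===== PORT A =====
-- Python `for cell in range(len(cache[set_number]))`; falling off the loop (or an empty row)
-- returns Python None, outside the String type → excluded by Pre_; the ports return "" there.
def hitLoopA (row : List (Option Int)) (block_number : Int) : List Nat → String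
  | [] => ""
  | cell :: rest =>
    let data := (row[cell]?).getD none
    if ¬ (some block_number ∈ row) ∧ data = none then "M"
    else if ¬ (some block_number ∈ row) ∧ ¬ ((none : Option Int) ∈ row) then "M"
    else if some block_number ∈ row then "H"
    else hitLoopA row block_number rest

def hit_or_miss (cache : List (List (Option Int))) (set_number : Int) (block_number : Int) (last_element_pointers : List Int) : String :=
  match PySem.List.pyGet? cache set_number with
  | none => ""          -- Python: IndexError (outside Pre_)
  | some row => hitLoopA row block_number (List.range row.length)

-- ===== PORT B =====
def hit_or_miss_alt (cache : List (List (Option Int))) (set_number : Int) (block_number : Int) (last_element_pointers : List Int) : String :=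
  match PySem.List.pyGet? cache set_number with
  | none => ""          -- Python: IndexError (outside Pre_)
  | some row =>
    if some block_number ∈ row then "H"
    else if (none : Option Int) ∈ row then "M"   -- place at first None slot (mutation, return "M")
    else "M"                                     -- eviction (mutation, return "M")

-- ===== PRECONDITION & SPEC =====
-- Pre_ excludes exactly: set_number out of range of cache (A raises IndexError); an empty
-- row, where A falls off the loop and returns None, not a str; and, on a miss, set_number out
-- of range of last_element_pointers or an eviction pointer landing outside the row (A raises
-- IndexError there).
def Pre_hit_or_miss (cache : List (List (Option Int))) (set_number : Int) (block_number : Int) (last_element_pointers : List Int) : Prop :=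
  -(cache.length : Int) ≤ set_number ∧ set_number < cache.length ∧
  (let row := (PySem.List.pyGet? cache set_number).getD []
   row ≠ [] ∧
   (some block_number ∈ row ∨
     (-(last_element_pointers.length : Int) ≤ set_number ∧ set_number < last_element_pointers.length ∧
      ((none : Option Int) ∈ row ∨
        (let p := (PySem.List.pyGet? last_element_pointers set_number).getD 0;
         let p' := if p = 1 then p - 1 else p + 1;
         -(row.length : Int) ≤ p' ∧ p' < row.length)))))
instance (cache : List (List (Option Int))) (set_number : Int) (block_number : Int) (last_element_pointers : List Int) : Decidable (Pre_hit_or_miss cache set_number block_number last_element_pointers) := by unfold Pre_hit_or_miss; infer_instance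

def pvWitness_hit_or_miss : List (List (Option Int)) × Int × Int × List Int := ([[some 1, none]], 0, 1, [0])

def Spec_hit_or_miss (cache : List (List (Option Int))) (set_number : Int) (block_number : Int) (last_element_pointers : List Int) (out : String) : Prop := out = hit_or_miss_alt cache set_number block_number last_element_pointers
instance (cache : List (List (Option Int))) (set_number : Int) (block_number : Int) (last_element_pointers : List Int) (out : String) : Decidable (Spec_hit_or_miss cache set_number block_number last_element_pointers out) := by unfold Spec_hit_or_miss; infer_instance

-- ===== CLAIM (what is proved, stated in full; the proofs are below) =====
def Claim_equal_hit_or_miss : Prop := ∀ (cache : List (List (Option Int))) (set_number : Int) (block_number : Int) (last_element_pointers : List Int), Dom_hit_or_miss cache set_number block_number last_element_pointers → Pre_hit_or_miss cache set_number block_number last_element_pointers → Spec_hit_or_miss cache set_number block_number last_element_pointers (hit_or_miss cache set_number block_number last_element_pointers)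

-- ===== LEMMAS AND PROOFS =====

-- On a miss with a completely full row, the very first cell returns "M".
lemma hitLoopA_full (row : List (Option Int)) (b : Int) (cells : List Nat)
    (hb : some b ∉ row) (hn : (none : Option Int) ∉ row) (hc : cells ≠ []) :
    hitLoopA row b cells = "M" := by
  cases cells with
  | nil => exact absurd rfl hc
  | cons c cs =>
    simp only [hitLoopA]
    by_cases hd : (row[c]?).getD none = none <;> simp [hd, hb, hn]

-- On a miss with a None slot reachable by the remaining cells, the loop returns "M".
lemma hitLoopA_none (row : List (Option Int)) (b : Int)
    (hb : some b ∉ row) :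
    ∀ cells : List Nat, (∃ i ∈ cells, (row[i]?).getD none = none) → hitLoopA row b cells = "M" := by
  intro cells
  induction cells with
  | nil => rintro ⟨i, hi, _⟩; exact absurd hi (by simp)
  | cons c cs ih =>
    rintro ⟨i, hi, hgd⟩
    simp only [hitLoopA]
    by_cases hd : (row[c]?).getD none = none
    · simp [hd, hb]
    · by_cases hn : (none : Option Int) ∈ row
      · have hics : i ∈ cs := by
          rcases List.mem_cons.mp hi with h | h
          · exact absurd (h ▸ hgd) hd
          · exact h
        simp [hd, hb, hn, ih ⟨i, hics, hgd⟩]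
      · simp [hd, hb, hn]

theorem hit_or_miss_spec : Claim_equal_hit_or_miss := by
  intro cache s b lp _ hpre
  unfold Spec_hit_or_miss hit_or_miss hit_or_miss_alt
  obtain ⟨h1, h2, hrest⟩ := hpre
  have hin : PySem.Raise.InRange cache.length s := by
    constructor <;> omega
  obtain ⟨row, hrow⟩ : ∃ row, PySem.List.pyGet? cache s = some row := by
    cases h : PySem.List.pyGet? cache s with
    | none => exact absurd hin (by rwa [← PySem.List.pyGet?_eq_none_iff])
    | some r => exact ⟨r, rfl⟩
  rw [hrow] at hrest ⊢
  dsimp only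
  simp only [Option.getD_some] at hrest
  obtain ⟨hne, hcases⟩ := hrest
  by_cases hb : some b ∈ row
  · -- hit: the first loop iteration returns "H"
    cases hc : List.range row.length with
    | nil =>
      exact absurd (List.range_eq_nil.mp hc) (by simpa using List.length_pos_iff.mpr hne |>.ne')
    | cons c cs => simp [hitLoopA, hb]
  · -- miss
    by_cases hn : (none : Option Int) ∈ row
    · obtain ⟨j, hj, hje⟩ := List.mem_iff_getElem.mp hn
      have : (row[j]?).getD none = none := by rw [List.getElem?_eq_getElem hj, hje]; rfl
      simp [hb, hn, hitLoopA_none row b hb (List.range row.length) ⟨j, List.mem_range.mpr hj, this⟩]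
    · have hc : List.range row.length ≠ [] := by
        simp [List.range_eq_nil, List.length_eq_zero_iff, hne]
      simp [hb, hn, hitLoopA_full row b _ hb hn hc]
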